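-- pv_equiv track=rewrite | github.com/niki4/leetcode_py3 | medium/454_4sum_ii.py | kSumCount
-- ===== SOURCE A (Python) =====
-- import collections
-- import itertools
-- from typing import List
--
-- def kSumCount(nums: List[List[int]]):
--     k = len(nums)
--     hashes = nums[:k // 2]  # arrays to be hashed
--     iters = nums[k // 2:]  # arrays to be iterated over
--
--     #  product(A, B) returns the same as:  ((x,y) for x in A for y in B).
--     ctr = collections.Counter([sum(group) for group in itertools.product(*hashes)])
--     iters_sum = [sum(group) for group in itertools.product(*iters)]
--
--     res = 0
--     for val in iters_sum:
--         complement = 0 - val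
--         res += ctr.get(complement, 0)
--     return res
-- ===== SOURCE B (Python) =====
-- import itertools
-- from typing import List
--
-- def kSumCount(nums: List[List[int]]):
--     return sum(1 for group in itertools.product(*nums) if sum(group) == 0)
-- ===== Notes on version B (the rewrite author's own statement) =====
-- stated objective: simpler
-- what changed: Replaces the meet-in-the-middle scheme (Counter of one half's product sums plus a complement-lookup loop over the other half) with one flat brute-force pass over the full Cartesian product counting zero-sum tuples.
import Mathlib
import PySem

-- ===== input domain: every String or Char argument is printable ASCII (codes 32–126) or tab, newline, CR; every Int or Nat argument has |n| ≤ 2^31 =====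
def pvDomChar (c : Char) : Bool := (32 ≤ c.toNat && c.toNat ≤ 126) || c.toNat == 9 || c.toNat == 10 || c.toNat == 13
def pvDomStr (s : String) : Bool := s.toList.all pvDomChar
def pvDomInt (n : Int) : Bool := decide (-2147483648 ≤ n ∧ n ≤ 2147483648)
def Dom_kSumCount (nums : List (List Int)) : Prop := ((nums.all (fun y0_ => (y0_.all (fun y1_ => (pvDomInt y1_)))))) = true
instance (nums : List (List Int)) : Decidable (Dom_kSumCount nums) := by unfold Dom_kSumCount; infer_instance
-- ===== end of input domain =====

-- B replaces A's meet-in-the-middle (Counter of one half's product sums + complement lookups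
-- over the other half) by one flat count over the full Cartesian product (simpler; not faster).


-- itertools.product(*xss): list of all ways to pick one element from each list, in Python's order
def pvProduct : List (List Int) → List (List Int)
  | [] => [[]]
  | xs :: rest => xs.flatMap (fun x => (pvProduct rest).map (x :: ·))

-- ===== PORT A =====
def kSumCount (nums : List (List Int)) : Int :=
  let k : Int := nums.length
  let hashes := PySem.List.slice nums none (some (PySem.Int.floordiv k 2))
  let iters := PySem.List.slice nums (some (PySem.Int.floordiv k 2)) none
  let ctr := PySem.Dict.counter ((pvProduct hashes).map (fun group => group.sum))
  let iters_sum := (pvProduct iters).map (fun group => group.sum)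
  iters_sum.foldl (fun res val => res + ctr.getD (0 - val) 0) 0

-- ===== PORT B =====
def kSumCount_alt (nums : List (List Int)) : Int :=
  ((pvProduct nums).countP (fun group => group.sum == 0) : Int)

-- ===== PRECONDITION & SPEC =====
def Spec_kSumCount (nums : List (List Int)) (out : Int) : Prop := out = kSumCount_alt nums
instance (nums : List (List Int)) (out : Int) : Decidable (Spec_kSumCount nums out) := by unfold Spec_kSumCount; infer_instance

-- ===== CLAIM (what is proved, stated in full; the proofs are below) =====
def Claim_equal_kSumCount : Prop := ∀ (nums : List (List Int)), Dom_kSumCount nums → Spec_kSumCount nums (kSumCount nums)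

-- ===== LEMMAS AND PROOFS =====

theorem pvProduct_append (as bs : List (List Int)) :
    pvProduct (as ++ bs) = (pvProduct as).flatMap (fun h => (pvProduct bs).map (h ++ ·)) := by
  induction as with
  | nil => simp [pvProduct]
  | cons xs rest ih =>
      simp [pvProduct, ih, List.flatMap_assoc, List.map_flatMap, List.flatMap_map, List.map_map, Function.comp_def]

theorem int_countP (l : List (List Int)) (p : List Int → Bool) :
    ((l.countP p : Int)) = (l.map (fun x => if p x then (1 : Int) else 0)).sum := by
  induction l with
  | nil => simp
  | cons x t ih =>
      by_cases h : p x
      · simp [h, ih]; ring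
      · simp [h, ih]

theorem sum_map_add_int' {α : Type} (l : List α) (f g : α → Int) :
    (l.map (fun x => f x + g x)).sum = (l.map f).sum + (l.map g).sum := by
  induction l with
  | nil => simp
  | cons x t ih => simp [ih]; ring

theorem sum_swap_int {α β : Type} (l₁ : List α) (l₂ : List β) (f : α → β → Int) :
    (l₁.map (fun a => (l₂.map (f a)).sum)).sum
      = (l₂.map (fun b => (l₁.map (fun a => f a b)).sum)).sum := by
  induction l₁ with
  | nil => simp
  | cons a t ih =>
      simp only [List.map_cons, List.sum_cons, ih, ← sum_map_add_int']

theorem countP_flatMap_int {α β : Type} (l : List α) (f : α → List β) (p : β → Bool) :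
    (((l.flatMap f).countP p : Int)) = (l.map (fun a => ((f a).countP p : Int))).sum := by
  induction l with
  | nil => simp
  | cons a t ih => simp [List.flatMap_cons, List.countP_append, ih]

-- ===== VERDICT (by name: the statement is the Claim_ definition above) =====
theorem kSumCount_spec : Claim_equal_kSumCount := by
  intro nums _
  show kSumCount nums = kSumCount_alt nums
  unfold kSumCount kSumCount_alt
  dsimp only
  have hm : PySem.Int.floordiv (nums.length : Int) 2 = ((nums.length / 2 : Nat) : Int) := by
    exact_mod_cast PySem.Int.floordiv_natCast nums.length 2
  rw [hm, PySem.List.slice_to_natCast, PySem.List.slice_from_natCast]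
  set m := nums.length / 2 with hmdef
  rw [PySem.List.foldl_add]
  have hsplit : nums = nums.take m ++ nums.drop m := (List.take_append_drop m nums).symm
  conv_rhs => rw [hsplit]
  rw [pvProduct_append, countP_flatMap_int]
  simp only [List.map_map, PySem.Dict.getD_counter]
  -- LHS: 0 + Σ_{t ∈ P(drop)} count of (P(take)).map sum equal to (0 - t.sum)
  -- RHS: Σ_{h ∈ P(take)} countP over (P(drop)).map (h ++ ·) of sum == 0
  have lhs_eq : ∀ t : List Int,
      (((pvProduct (nums.take m)).map (fun g => g.sum)).count (0 - t.sum) : Int)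
        = ((pvProduct (nums.take m)).countP (fun h => h.sum + t.sum == 0) : Int) := by
    intro t
    rw [List.count, List.countP_map]
    congr 2
    funext h
    simp only [Function.comp_def]
    by_cases hc : h.sum + t.sum = 0 <;> simp [hc] <;> omega
  have rhs_eq : ∀ h : List Int,
      ((((pvProduct (nums.drop m)).map (fun t => h ++ t)).countP (fun g => g.sum == 0)) : Int)
        = ((pvProduct (nums.drop m)).countP (fun t => h.sum + t.sum == 0) : Int) := by
    intro h
    rw [List.countP_map]
    simp [Function.comp_def, List.sum_append]
  calc (0 : Int) + ((pvProduct (nums.drop m)).map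
          ((fun val => (((pvProduct (nums.take m)).map (fun group => group.sum)).count
              (0 - val) : Int)) ∘ fun group => group.sum)).sum
      = ((pvProduct (nums.drop m)).map (fun t =>
          ((pvProduct (nums.take m)).map
            (fun h => if h.sum + t.sum == 0 then (1 : Int) else 0)).sum)).sum := by
        rw [zero_add]
        apply congrArg List.sum
        apply List.map_congr_left
        intro t _
        simp only [Function.comp_def]
        rw [lhs_eq t, int_countP]
    _ = ((pvProduct (nums.take m)).map (fun h =>
          ((pvProduct (nums.drop m)).map
            (fun t => if h.sum + t.sum == 0 then (1 : Int) else 0)).sum)).sum := by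
        rw [sum_swap_int]
    _ = ((pvProduct (nums.take m)).map (fun h =>
          (((pvProduct (nums.drop m)).map (fun t => h ++ t)).countP
            (fun g => g.sum == 0) : Int))).sum := by
        apply congrArg List.sum
        apply List.map_congr_left
        intro h _
        rw [rhs_eq h, int_countP]
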